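-- pv_equiv track=rewrite | github.com/Jeremylaby/ASD_2023 | Python/asd_-_kolokwium_2/ASD - Kolokwium 2/zad1k.py | roznica
-- ===== SOURCE A (Python) =====
-- def roznica( S ):
--     n=len(S)
--     DP=[[None]*n for _ in range(n)]
--     #for i in range(n):
--         #f(i,n-1,DP,S)
--     maks=-1
--     for a in range(n):
--         if S[a]=='0':
--             DP[a][a]=1
--         else:
--             DP[a][a]=-1
--     for a in range(n):
--         for b in range(a+1,n):
--             if S[b]=='0':
--                 DP[a][b]=DP[a][b-1]+1
--             else:
--                 DP[a][b]=DP[a][b-1]-1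
--             maks=max(maks,DP[a][b])
--
--
--
--     #Tutaj proszę wpisać własną implementację
--     return maks
-- ===== SOURCE B (Python) =====
-- def roznica(S):
--     # prefix sums + one right-to-left pass keeping the running suffix maximum
--     P = [0]
--     for c in S:
--         P.append(P[-1] + (1 if c == '0' else -1))
--     n = len(S)
--     best = -1
--     ms = P[n]
--     for a in range(n - 2, -1, -1):
--         if P[a + 2] > ms:
--             ms = P[a + 2]
--         d = ms - P[a]
--         if d > best:
--             best = d
--     return best
-- ===== Notes on version B (the rewrite author's own statement) =====
-- stated objective: faster
-- what changed: Replaced the O(n^2) DP table over all substring endpoints by prefix sums and a single right-to-left pass keeping a running suffix maximum of the prefix sums.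
import Mathlib
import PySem

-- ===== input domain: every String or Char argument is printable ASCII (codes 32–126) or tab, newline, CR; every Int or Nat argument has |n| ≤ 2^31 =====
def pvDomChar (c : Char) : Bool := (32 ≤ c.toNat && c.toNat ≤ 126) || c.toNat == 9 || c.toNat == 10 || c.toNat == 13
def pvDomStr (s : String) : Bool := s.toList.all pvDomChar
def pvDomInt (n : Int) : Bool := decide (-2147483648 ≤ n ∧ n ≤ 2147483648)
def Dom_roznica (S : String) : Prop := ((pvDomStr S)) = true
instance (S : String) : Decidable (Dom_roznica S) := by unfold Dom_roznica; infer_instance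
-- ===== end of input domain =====

-- B replaces A's O(n^2) DP over all substrings by prefix sums and one right-to-left pass (suffix maximum); return values are proved equal.

-- ===== PORT A =====
-- loop bodies of A's three loops, named so the proofs can talk about them
-- DP[a][a] = 1 if S[a]=='0' else -1   (indexing is in range: a < n, so getD is exact)
def aInit (L : List Char) (DP : List (List (Option Int))) (a : Nat) : List (List (Option Int)) :=
  DP.set a ((DP.getD a []).set a (some (if L.getD a ' ' = '0' then (1 : Int) else -1)))

-- body of the inner b-loop: DP[a][b] = DP[a][b-1] ± 1; maks = max(maks, DP[a][b])
-- exact: the entry DP[a][b-1] read here was written by the previous iteration (or by aInit), so it is never None;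
-- the .getD defaults are never taken.
def aStep (L : List Char) (a : Nat) (st : List (List (Option Int)) × Int) (b : Nat) :
    List (List (Option Int)) × Int :=
  let prev := ((st.1.getD a []).getD (b - 1) (some 0)).getD 0
  let d := if L.getD b ' ' = '0' then prev + 1 else prev - 1
  (st.1.set a ((st.1.getD a []).set b (some d)), max st.2 d)

-- range(n) / range(a+1, n) are transcribed as the Nat ranges List.range n / List.range' (a+1) (n-(a+1)),
-- exact because both bounds are nonnegative.
def roznica (S : String) : Int :=
  let L := S.toList
  let n := L.length
  let DP0 : List (List (Option Int)) := List.replicate n (List.replicate n (none : Option Int))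
  let DP1 := (List.range n).foldl (aInit L) DP0
  let st := (List.range n).foldl
      (fun st a => (List.range' (a + 1) (n - (a + 1))).foldl (aStep L a) st) (DP1, (-1 : Int))
  st.2

-- ===== PORT B =====
-- body of the P-building loop: P.append(P[-1] + (1 if c=='0' else -1))
def bScan (P : List Int) (c : Char) : List Int :=
  P ++ [(PySem.List.pyGet? P (-1)).getD 0 + (if c = '0' then (1 : Int) else -1)]

-- body of the right-to-left loop over a; state = (best, ms); indices a, a+2, n are in range, getD is exact
def bStep (P : List Int) (st : Int × Int) (a : Nat) : Int × Int :=
  let ms := if P.getD (a + 2) 0 > st.2 then P.getD (a + 2) 0 else st.2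
  (if ms - P.getD a 0 > st.1 then ms - P.getD a 0 else st.1, ms)

-- range(n-2, -1, -1) = [n-2, ..., 0] is transcribed as (List.range (n-1)).reverse, exact for every n ≥ 0.
def roznica_alt (S : String) : Int :=
  let L := S.toList
  let P := L.foldl bScan [(0 : Int)]
  let n := L.length
  let st := ((List.range (n - 1)).reverse).foldl (bStep P) ((-1 : Int), P.getD n 0)
  st.1

-- ===== PRECONDITION & SPEC =====
def Spec_roznica (S : String) (out : Int) : Prop := out = roznica_alt S
instance (S : String) (out : Int) : Decidable (Spec_roznica S out) := by unfold Spec_roznica; infer_instance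

-- ===== CLAIM (what is proved, stated in full; the proofs are below) =====
def Claim_equal_roznica : Prop := ∀ (S : String), Dom_roznica S → Spec_roznica S (roznica S)

-- ===== LEMMAS AND PROOFS =====

-- value of one character: +1 for '0', -1 otherwise
def vc (c : Char) : Int := if c = '0' then 1 else -1

-- prefix sum: pref L k = value of S[0:k]
def pref (L : List Char) (k : Nat) : Int := ((L.take k).map vc).sum

-- suffix maximum of the prefix sums: max of pref L j for j in [k, L.length] (= pref L.length for k > L.length)
def msInv (L : List Char) (k : Nat) : Int :=
  ((List.range' k (L.length - k)).map (pref L)).foldr max (pref L L.length)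

-- tail of the scan of prefix sums starting from x (what B's P-building loop appends)
def scanT (x : Int) : List Char → List Int
  | [] => []
  | c :: cs => (x + vc c) :: scanT (x + vc c) cs

-- well-formedness of A's DP table
def WF (DP : List (List (Option Int))) (n : Nat) : Prop :=
  DP.length = n ∧ ∀ row ∈ DP, row.length = n

theorem pref_succ (L : List Char) (a : Nat) (h : a < L.length) :
    pref L (a + 1) = pref L a + vc (L.getD a ' ') := by
  unfold pref
  rw [List.take_add_one]
  simp [h, List.getD_eq_getElem?_getD]

theorem msInv_step (L : List Char) (k : Nat) (h : k ≤ L.length) :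
    max (pref L k) (msInv L (k + 1)) = msInv L k := by
  rcases Nat.lt_or_ge k L.length with h1 | h1
  · unfold msInv
    have e : L.length - k = (L.length - (k+1)) + 1 := by omega
    rw [e, List.range'_succ]
    simp
  · have h2 : k = L.length := by omega
    subst h2
    unfold msInv
    rw [Nat.sub_eq_zero_of_le (by omega), Nat.sub_self]
    simp

theorem msInv_top (L : List Char) (k : Nat) (h : L.length ≤ k) : msInv L k = pref L L.length := by
  unfold msInv
  rw [Nat.sub_eq_zero_of_le h]; simp

theorem pyGet_last (P : List Int) (x : Int) : PySem.List.pyGet? (P ++ [x]) (-1) = some x := by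
  simp [PySem.List.pyGet?, PySem.List.pyIdx?]

theorem scan_chars (L2 : List Char) : ∀ (P : List Int) (x : Int),
    PySem.List.pyGet? P (-1) = some x → L2.foldl bScan P = P ++ scanT x L2 := by
  induction L2 with
  | nil => intro P x h; simp [scanT]
  | cons c cs ih =>
    intro P x h
    rw [List.foldl_cons]
    have hb : bScan P c = P ++ [x + vc c] := by simp [bScan, h, vc]
    rw [hb, ih _ _ (pyGet_last P (x + vc c))]
    simp [scanT]

theorem scanT_get (M : List Char) : ∀ (x : Int) (k : Nat), k < M.length →
    (scanT x M)[k]? = some (x + pref M (k + 1)) := by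
  induction M with
  | nil => intro x k h; simp at h
  | cons c cs ih =>
    intro x k h
    cases k with
    | zero => simp [scanT, pref, vc]
    | succ j =>
      simp only [scanT, List.getElem?_cons_succ]
      rw [ih _ j (by simpa using h)]
      have : pref (c :: cs) (j + 2) = vc c + pref cs (j + 1) := by
        simp [pref]
      rw [this]; ring_nf

theorem P_getD (L : List Char) (k : Nat) (hk : k ≤ L.length) :
    (L.foldl bScan [(0 : Int)]).getD k 0 = pref L k := by
  rw [scan_chars L [(0:Int)] 0 (by decide)]
  cases k with
  | zero => simp [pref]
  | succ j =>
    have hj : j < L.length := by omega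
    rw [List.getD, List.singleton_append, List.getElem?_cons_succ, scanT_get L 0 j hj]
    simp

theorem ite_max (x m : Int) : (if x > m then x else m) = max m x := by
  rw [max_def]; split <;> split <;> omega

theorem bloop (L : List Char) : ∀ (k : Nat), k + 1 ≤ L.length → ∀ (best : Int),
    (((List.range k).reverse).foldl (bStep (L.foldl bScan [(0 : Int)])) (best, msInv L (k + 2))).1
      = ((List.range k).reverse).foldl (fun m a => max m (msInv L (a + 2) - pref L a)) best := by
  intro k
  induction k with
  | zero => intro _ best; simp
  | succ j ih =>
    intro hk best
    rw [List.range_succ]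
    simp only [List.reverse_append, List.reverse_singleton, List.singleton_append, List.foldl_cons]
    have hP2 : (L.foldl bScan [(0:Int)]).getD (j + 2) 0 = pref L (j + 2) := P_getD L (j+2) (by omega)
    have hPj : (L.foldl bScan [(0:Int)]).getD j 0 = pref L j := P_getD L j (by omega)
    have hms : bStep (L.foldl bScan [(0 : Int)]) (best, msInv L (j + 1 + 2)) j
        = (max best (msInv L (j + 2) - pref L j), msInv L (j + 2)) := by
      unfold bStep
      simp only [hP2, hPj, ite_max]
      rw [max_comm (msInv L (j+1+2)) (pref L (j+2)), msInv_step L (j+2) (by omega)]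
    rw [hms, ih (by omega)]

theorem B_closed (S : String) :
    roznica_alt S = ((List.range (S.toList.length - 1)).reverse).foldl
      (fun m a => max m (msInv S.toList (a + 2) - pref S.toList a)) (-1) := by
  simp only [roznica_alt]
  rcases Nat.eq_zero_or_pos S.toList.length with h | h
  · simp [h]
  · have h2 : (S.toList.foldl bScan [(0:Int)]).getD S.toList.length 0
        = msInv S.toList (S.toList.length - 1 + 2) := by
      rw [P_getD S.toList S.toList.length (le_refl _), msInv_top S.toList _ (by omega)]
    rw [h2]
    exact bloop S.toList (S.toList.length - 1) (by omega) (-1)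

theorem getD_set_ne (DP : List (List (Option Int))) (i j : Nat) (r : List (Option Int)) (h : i ≠ j) :
    (DP.set i r).getD j [] = DP.getD j [] := by
  rw [List.getD_eq_getElem?_getD, List.getD_eq_getElem?_getD, List.getElem?_set_ne h]

theorem getD_set_self (DP : List (List (Option Int))) (i : Nat) (r : List (Option Int)) (h : i < DP.length) :
    (DP.set i r).getD i [] = r := by
  rw [List.getD_eq_getElem?_getD, List.getElem?_set_self h]; rfl

theorem WF_set (DP : List (List (Option Int))) (n : Nat) (i : Nat) (r : List (Option Int))
    (hWF : WF DP n) (hr : r.length = n) : WF (DP.set i r) n := by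
  obtain ⟨h1, h2⟩ := hWF
  refine ⟨by simpa using h1, fun row hrow => ?_⟩
  rcases List.mem_or_eq_of_mem_set hrow with h | h
  · exact h2 row h
  · rw [h]; exact hr

theorem rowlen (DP : List (List (Option Int))) (n a : Nat) (hWF : WF DP n) (ha : a < n) :
    (DP.getD a []).length = n := by
  obtain ⟨h1, h2⟩ := hWF
  have : a < DP.length := by omega
  rw [List.getD_eq_getElem?_getD, List.getElem?_eq_getElem this]
  exact h2 _ (List.getElem_mem this)

theorem aInit_WF (L : List Char) (DP : List (List (Option Int))) (n a : Nat)
    (hWF : WF DP n) (ha : a < n) : WF (aInit L DP a) n :=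
  WF_set _ _ _ _ hWF (by rw [List.length_set]; exact rowlen DP n a hWF ha)

theorem init_loop (L : List Char) : ∀ (k : Nat), k ≤ L.length → ∀ DP, WF DP L.length →
    WF ((List.range k).foldl (aInit L) DP) L.length ∧
    ∀ a, a < k → ((((List.range k).foldl (aInit L) DP).getD a [])[a]?
      = some (some (vc (L.getD a ' ')))) := by
  intro k
  induction k with
  | zero => intro _ DP h; exact ⟨h, by omega⟩
  | succ j ih =>
    intro hk DP hWF
    rw [List.range_succ, List.foldl_append, List.foldl_cons, List.foldl_nil]
    set DPj := (List.range j).foldl (aInit L) DP with hDPj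
    obtain ⟨hWFj, hdiag⟩ := ih (by omega) DP hWF
    have hjlen : j < DPj.length := by rw [hWFj.1]; omega
    have hrl : (DPj.getD j []).length = L.length := rowlen DPj L.length j hWFj (by omega)
    constructor
    · exact aInit_WF L DPj L.length j hWFj (by omega)
    · intro a ha
      rcases Nat.lt_or_ge a j with h | h
      · have : (aInit L DPj j).getD a [] = DPj.getD a [] := by
          unfold aInit; exact getD_set_ne _ _ _ _ (by omega)
        rw [this]; exact hdiag a h
      · have haj : a = j := by omega
        subst haj
        unfold aInit
        rw [getD_set_self _ _ _ hjlen, List.getElem?_set_self (by omega)]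
        simp [vc]

theorem inner_loop (L : List Char) (a : Nat) : ∀ (l s : Nat) (DP : List (List (Option Int))) (m : Int),
    a + 1 ≤ s → s + l ≤ L.length → WF DP L.length →
    (DP.getD a [])[s - 1]? = some (some (pref L s - pref L a)) →
    ∃ DP', (List.range' s l).foldl (aStep L a) (DP, m)
        = (DP', (List.range' s l).foldl (fun m b => max m (pref L (b + 1) - pref L a)) m)
      ∧ WF DP' L.length ∧ ∀ j, j ≠ a → DP'.getD j [] = DP.getD j [] := by
  intro l
  induction l with
  | zero => intro s DP m _ _ hWF _; exact ⟨DP, by simp, hWF, fun j _ => rfl⟩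
  | succ t ih =>
    intro s DP m hs hsl hWF hprev
    have hsn : s < L.length := by omega
    have han : a < L.length := by omega
    have hrl : (DP.getD a []).length = L.length := rowlen DP L.length a hWF han
    have haD : a < DP.length := by rw [hWF.1]; omega
    have hstep : aStep L a (DP, m) s
        = (DP.set a ((DP.getD a []).set s (some (pref L (s+1) - pref L a))),
           max m (pref L (s+1) - pref L a)) := by
      unfold aStep
      have hpd : ((DP.getD a []).getD (s - 1) (some 0)).getD 0 = pref L s - pref L a := by
        rw [List.getD_eq_getElem?_getD, hprev]; rfl
      have hd : (if L.getD s ' ' = '0' then ((DP.getD a []).getD (s - 1) (some 0)).getD 0 + 1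
          else ((DP.getD a []).getD (s - 1) (some 0)).getD 0 - 1) = pref L (s+1) - pref L a := by
        rw [hpd, pref_succ L s hsn]
        unfold vc
        split <;> ring
      simp only []
      rw [hd]
    rw [List.range'_succ, List.foldl_cons, hstep]
    set DP1 := DP.set a ((DP.getD a []).set s (some (pref L (s+1) - pref L a))) with hDP1
    have hWF1 : WF DP1 L.length :=
      WF_set _ _ _ _ hWF (by rw [List.length_set]; exact hrl)
    have hprev1 : (DP1.getD a [])[s + 1 - 1]? = some (some (pref L (s+1) - pref L a)) := by
      rw [hDP1, getD_set_self _ _ _ haD]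
      simpa using List.getElem?_set_self (by omega : s < (DP.getD a []).length)
    obtain ⟨DP', heq, hWF', hrows⟩ := ih (s+1) DP1 (max m (pref L (s+1) - pref L a))
      (by omega) (by omega) hWF1 hprev1
    refine ⟨DP', by rw [heq, List.foldl_cons], hWF', fun j hj => ?_⟩
    rw [hrows j hj, hDP1, getD_set_ne _ _ _ _ (fun h => hj h.symm)]

theorem outer_loop (L : List Char) : ∀ (l s : Nat) (DP : List (List (Option Int))) (m : Int),
    s + l ≤ L.length → WF DP L.length →
    (∀ a, s ≤ a → a < L.length → (DP.getD a [])[a]? = some (some (vc (L.getD a ' ')))) →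
    ((List.range' s l).foldl
        (fun st a => (List.range' (a + 1) (L.length - (a + 1))).foldl (aStep L a) st) (DP, m)).2
      = (List.range' s l).foldl
          (fun m a => (List.range' (a + 1) (L.length - (a + 1))).foldl
            (fun m b => max m (pref L (b + 1) - pref L a)) m) m := by
  intro l
  induction l with
  | zero => intro s DP m _ _ _; simp
  | succ t ih =>
    intro s DP m hsl hWF hdiag
    have hsn : s < L.length := by omega
    have hd0 : (DP.getD s [])[s + 1 - 1]? = some (some (pref L (s+1) - pref L s)) := by
      have := hdiag s (le_refl s) hsn
      rw [pref_succ L s hsn]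
      simpa using this
    obtain ⟨DP', heq, hWF', hrows⟩ := inner_loop L s (L.length - (s+1)) (s+1) DP m
      (le_refl _) (by omega) hWF hd0
    rw [List.range'_succ, List.foldl_cons, List.foldl_cons, heq, ih (s+1) DP' _ (by omega) hWF']
    intro a ha han
    rw [hrows a (by omega)]
    exact hdiag a (by omega) han

theorem inner_closed (L : List Char) : ∀ (l s : Nat) (m c : Int), s + (l + 1) = L.length →
    (List.range' s (l + 1)).foldl (fun m b => max m (pref L (b + 1) - c)) m
      = max m (msInv L (s + 1) - c) := by
  intro l
  induction l with
  | zero =>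
    intro s m c h
    rw [msInv_top L (s+1) (by omega)]
    simp only [List.range'_succ, List.range'_zero, List.foldl_cons, List.foldl_nil]
    rw [(by omega : s + 1 = L.length)]
  | succ t ih =>
    intro s m c h
    rw [List.range'_succ, List.foldl_cons, ih (s+1) _ c (by omega)]
    rw [max_assoc, max_sub_sub_right, msInv_step L (s+1) (by omega)]

theorem A_closed (S : String) :
    roznica S = (List.range (S.toList.length - 1)).foldl
      (fun m a => max m (msInv S.toList (a + 2) - pref S.toList a)) (-1) := by
  simp only [roznica]
  set L := S.toList with hL
  have hWF0 : WF (List.replicate L.length (List.replicate L.length (none : Option Int))) L.length :=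
    ⟨List.length_replicate, fun row hrow => by
      rw [List.eq_of_mem_replicate hrow]; exact List.length_replicate⟩
  obtain ⟨hWF1, hdiag⟩ := init_loop L L.length (le_refl _) _ hWF0
  rw [List.range_eq_range'] at hWF1 hdiag ⊢
  rw [outer_loop L L.length 0 _ (-1) (by omega) hWF1 (fun a _ ha => hdiag a ha)]
  rcases Nat.eq_zero_or_pos L.length with h0 | h0
  · rw [h0]; simp
  · have hsplit : List.range' 0 L.length = List.range' 0 (L.length - 1) ++ [L.length - 1] := by
      conv_lhs => rw [(by omega : L.length = (L.length - 1) + 1)]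
      rw [List.range'_1_concat]
      simp
    rw [hsplit, List.foldl_append, List.foldl_cons, List.foldl_nil]
    have hlast : List.range' (L.length - 1 + 1) (L.length - (L.length - 1 + 1)) = [] := by
      rw [(by omega : L.length - (L.length - 1 + 1) = 0)]; rfl
    rw [hlast, List.foldl_nil, @List.range_eq_range' (L.length - 1)]
    exact PySem.List.foldl_congr_mem (List.range' 0 (L.length - 1)) _ _ (-1) (fun m a ha => by
      have han : a < L.length - 1 := by
        have := List.mem_range'_1.mp ha; omega
      have he : L.length - (a + 1) = (L.length - (a + 2)) + 1 := by omega
      rw [he, inner_closed L (L.length - (a+2)) (a+1) m (pref L a) (by omega)])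

-- ===== VERDICT (by name: the statement is the Claim_ definition above) =====
theorem roznica_spec : Claim_equal_roznica := by
  intro S _
  unfold Spec_roznica
  rw [A_closed S, B_closed S]
  exact (@List.Perm.foldl_eq _ _
    (fun m a => max m (msInv S.toList (a + 2) - pref S.toList a)) _ _
    ⟨fun b a1 a2 => max_right_comm _ _ _⟩
    (List.reverse_perm (List.range (S.toList.length - 1))).symm (-1))
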